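-- pv_equiv track=rewrite | github.com/brainopensource/Python-OpenGL | multi_threaded_sounds.py | generate_custom_list
-- ===== SOURCE A (Python) =====
-- def generate_custom_list(xlen):
--     start_value = 60
--     end_value = 108
--     direction = 1  # 1 for increasing, -1 for decreasing
--     current_value = start_value
--     midi_list = []
--
--     for _ in range(xlen):
--         midi_list.append(current_value)
--
--         # Determine the next value based on direction
--         next_value = current_value + direction
--
--         # Check and switch direction if limits are reached
--         if next_value > end_value:
--             direction = -1
--             next_value = end_value - 1  # Start decreasing from one step below the max
--         elif next_value < start_value:
--             direction = 1
--             next_value = start_value + 1  # Start increasing from one step above the min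
--
--         # Update current value for the next iteration
--         current_value = next_value
--
--     return midi_list
-- ===== SOURCE B (Python) =====
-- def generate_custom_list(xlen):
--     # Each element is a pure function of its index: the wave has period 96
--     # (ascent 60..108, descent 107..61), so compute it by modular arithmetic.
--     return [60 + p if p <= 48 else 156 - p for p in (i % 96 for i in range(xlen))]
-- ===== Notes on version B (the rewrite author's own statement) =====
-- stated objective: simpler
-- what changed: Replaces the stateful bouncing loop (direction/current accumulator with switch branches) by a stateless closed form: element i is computed directly from i % 96 with one conditional.
import Mathlib
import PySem

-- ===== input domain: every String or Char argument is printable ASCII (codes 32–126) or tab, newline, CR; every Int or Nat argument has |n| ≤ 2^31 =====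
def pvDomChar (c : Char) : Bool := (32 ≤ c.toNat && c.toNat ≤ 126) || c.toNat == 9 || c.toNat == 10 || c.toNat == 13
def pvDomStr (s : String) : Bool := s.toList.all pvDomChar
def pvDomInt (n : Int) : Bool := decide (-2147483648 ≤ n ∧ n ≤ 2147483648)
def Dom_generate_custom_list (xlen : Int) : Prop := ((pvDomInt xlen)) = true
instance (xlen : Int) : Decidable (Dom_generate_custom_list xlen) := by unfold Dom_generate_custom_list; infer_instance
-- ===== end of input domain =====

-- B changes the algorithm: A's stateful bouncing loop becomes a stateless per-index
-- closed form (index mod the period 96); same O(n) cost, simpler code.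

-- ===== PORT A =====
-- state = (direction, current_value, midi_list); one fold step per loop iteration
def genStep (s : Int × Int × List Int) (_ : Int) : Int × Int × List Int :=
  let direction := s.1
  let current_value := s.2.1
  let midi_list := s.2.2 ++ [current_value]
  let next_value := current_value + direction
  if next_value > 108 then (-1, 108 - 1, midi_list)
  else if next_value < 60 then (1, 60 + 1, midi_list)
  else (direction, next_value, midi_list)

def generate_custom_list (xlen : Int) : List Int :=
  ((PySem.List.pyRange 0 xlen 1).foldl genStep (1, 60, [])).2.2

-- ===== PORT B =====
def generate_custom_list_alt (xlen : Int) : List Int :=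
  (PySem.List.pyRange 0 xlen 1).map (fun i =>
    let p := PySem.Int.mod i 96
    if p ≤ 48 then 60 + p else 156 - p)

-- ===== PRECONDITION & SPEC =====
def Spec_generate_custom_list (xlen : Int) (out : List Int) : Prop := out = generate_custom_list_alt xlen
instance (xlen : Int) (out : List Int) : Decidable (Spec_generate_custom_list xlen out) := by unfold Spec_generate_custom_list; infer_instance

-- ===== CLAIM (what is proved, stated in full; the proofs are below) =====
def Claim_equal_generate_custom_list : Prop := ∀ (xlen : Int), Dom_generate_custom_list xlen → Spec_generate_custom_list xlen (generate_custom_list xlen)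

-- ===== LEMMAS AND PROOFS =====

-- the closed-form value of the wave at Nat index k
def waveVal (k : Nat) : Int :=
  if k % 96 ≤ 48 then 60 + (k % 96 : Int) else 156 - (k % 96 : Int)

-- loop invariant: at (virtual) index k the current value is waveVal k and the
-- direction is determined by k % 96 (either direction works at the trough)
def WaveInv (k : Nat) (d c : Int) : Prop :=
  c = waveVal k ∧
  ((k % 96 = 0 ∧ (d = 1 ∨ d = -1)) ∨
   (1 ≤ k % 96 ∧ k % 96 ≤ 48 ∧ d = 1) ∨
   (49 ≤ k % 96 ∧ d = -1))

theorem inv_step (k : Nat) (d c x : Int) (acc : List Int) (h : WaveInv k d c) :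
    ∃ d' c', genStep (d, c, acc) x = (d', c', acc ++ [waveVal k]) ∧ WaveInv (k + 1) d' c' := by
  obtain ⟨hc, hd⟩ := h
  subst hc
  simp only [genStep, waveVal, WaveInv] at *
  rcases hd with ⟨h0, rfl | rfl⟩ | ⟨h1, h2, rfl⟩ | ⟨h1, rfl⟩ <;>
    split_ifs with hA hB <;>
    refine ⟨_, _, rfl, ?_, ?_⟩ <;> omega

-- one generic pass: folding genStep over any list, starting from an invariant state
theorem fold_genStep (l : List Int) : ∀ (k : Nat) (d c : Int) (acc : List Int),
    WaveInv k d c →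
    (l.foldl genStep (d, c, acc)).2.2 =
      acc ++ (List.range l.length).map (fun j => waveVal (k + j)) := by
  induction l with
  | nil => intro k d c acc _; simp
  | cons x t ih =>
    intro k d c acc hinv
    obtain ⟨d', c', hg, hinv'⟩ := inv_step k d c x acc hinv
    rw [List.foldl_cons, hg, ih (k + 1) d' c' _ hinv']
    simp only [List.length_cons, List.range_succ_eq_map, List.map_cons, List.map_map,
      Function.comp_def, Nat.add_zero, List.append_assoc, List.singleton_append]
    exact congrArg _ (congrArg _ (List.map_congr_left fun j _ => congrArg waveVal (by omega)))

theorem pyRange_nonpos (x : Int) (h : x ≤ 0) : PySem.List.pyRange 0 x 1 = [] := by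
  simp [PySem.List.pyRange]; omega

theorem alt_at_natCast (j : Nat) :
    (if PySem.Int.mod (j : Int) 96 ≤ 48 then 60 + PySem.Int.mod (j : Int) 96
     else 156 - PySem.Int.mod (j : Int) 96) = waveVal j := by
  have h96 : (96 : Int) = ((96 : Nat) : Int) := rfl
  rw [h96, PySem.Int.mod_natCast]
  simp only [waveVal]
  split_ifs <;> push_cast <;> omega

-- ===== VERDICT (by name: the statement is the Claim_ definition above) =====
theorem generate_custom_list_spec : Claim_equal_generate_custom_list := by
  intro xlen _
  unfold Spec_generate_custom_list generate_custom_list generate_custom_list_alt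
  by_cases hle : xlen ≤ 0
  · rw [pyRange_nonpos xlen hle]; rfl
  · have hx : xlen = (xlen.toNat : Int) := by omega
    rw [hx, PySem.List.pyRange_zero_natCast,
      fold_genStep _ 0 1 60 [] ⟨by simp [waveVal], Or.inl ⟨by simp, Or.inl rfl⟩⟩]
    simp only [List.length_map, List.length_range, List.nil_append, List.map_map,
      Function.comp_def, Nat.zero_add]
    exact List.map_congr_left fun j _ => (alt_at_natCast j).symm
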